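-- pv_equiv track=rewrite | github.com/synesis-lang/synesis-lsp | synesis_lsp/explorer_requests.py | _iter_code_tokens
-- ===== SOURCE A (Python) =====
-- def _strip_comment(text: str) -> str:
--     idx = text.find("#")
--     return text if idx < 0 else text[:idx]
--
-- def _iter_code_tokens(value_text: str, base_offset: int) -> list[tuple[str, int]]:
--     text = _strip_comment(value_text)
--     tokens: list[tuple[str, int]] = []
--     start = 0
--     while start <= len(text):
--         comma_idx = text.find(",", start)
--         if comma_idx == -1:
--             segment = text[start:]
--             segment_start = start
--         else:
--             segment = text[start:comma_idx]
--             segment_start = start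
--
--         token_text = segment.strip()
--         if token_text:
--             leading_ws = len(segment) - len(segment.lstrip())
--             token_start = segment_start + leading_ws
--             tokens.append((token_text, base_offset + token_start))
--
--         if comma_idx == -1:
--             break
--         start = comma_idx + 1
--
--     return tokens
-- ===== SOURCE B (Python) =====
-- def _iter_code_tokens(value_text: str, base_offset: int) -> list[tuple[str, int]]:
--     # One-pass character scan: track the current token's first/last non-space
--     # positions; emit on comma, '#' or end of text. No find/slice-per-segment loop.
--     tokens: list[tuple[str, int]] = []
--     tok_start = None
--     tok_end = 0
--     i = 0
--     for ch in value_text: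
--         if ch == '#':
--             break
--         if ch == ',':
--             if tok_start is not None:
--                 tokens.append((value_text[tok_start:tok_end], base_offset + tok_start))
--             tok_start = None
--         elif not ch.isspace():
--             if tok_start is None:
--                 tok_start = i
--             tok_end = i + 1
--         i += 1
--     if tok_start is not None:
--         tokens.append((value_text[tok_start:tok_end], base_offset + tok_start))
--     return tokens
-- ===== Notes on version B (the rewrite author's own statement) =====
-- stated objective: alternative
-- what changed: Replaced A's find(',')-and-slice-per-segment while loop (plus per-segment strip/lstrip passes) by a single left-to-right character scan that tracks the current token's first/last non-space positions and emits on comma, '#' or end of text.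
import Mathlib
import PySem

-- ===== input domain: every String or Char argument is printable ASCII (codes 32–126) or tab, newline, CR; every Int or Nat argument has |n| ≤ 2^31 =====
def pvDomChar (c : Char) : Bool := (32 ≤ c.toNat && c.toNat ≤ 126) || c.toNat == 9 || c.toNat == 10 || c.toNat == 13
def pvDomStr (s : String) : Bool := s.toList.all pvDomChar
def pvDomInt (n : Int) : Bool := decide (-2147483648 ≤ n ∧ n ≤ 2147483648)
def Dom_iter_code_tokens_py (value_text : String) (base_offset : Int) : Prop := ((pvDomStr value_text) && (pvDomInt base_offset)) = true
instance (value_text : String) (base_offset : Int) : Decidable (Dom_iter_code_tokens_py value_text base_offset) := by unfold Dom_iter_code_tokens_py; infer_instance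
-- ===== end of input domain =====

-- B replaces A's find-comma-and-slice segment loop by a single character scan tracking
-- token boundaries; same tokens and offsets, proved equal on all inputs (objective: alternative).

-- ===== PORT A =====
-- _strip_comment
def stripCommentA (text : List Char) : List Char :=
  let idx := PySem.Chars.find text ['#']
  if idx < 0 then text else PySem.Chars.slice text none (some idx)

-- the while loop of _iter_code_tokens; fuel = text.length + 2 suffices since start strictly increases
def goA (text : List Char) (base : Int) : Nat → Nat → List (String × Int)
  | 0, _ => []
  | fuel+1, start =>
    if start ≤ text.length then
      let ci := PySem.Chars.findFrom text [','] (start : Int) none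
      let segment := if ci = -1 then PySem.Chars.slice text (some (start : Int)) none
        else PySem.Chars.slice text (some (start : Int)) (some ci)
      let token := PySem.Chars.strip segment
      (if token ≠ [] then
        [(String.ofList token, base + ((start + (segment.length - (PySem.Chars.lstrip segment).length) : Nat) : Int))]
       else []) ++
      (if ci = -1 then [] else goA text base fuel (ci.toNat + 1))
    else []

def iter_code_tokens_py (value_text : String) (base_offset : Int) : List (String × Int) :=
  let text := stripCommentA value_text.toList
  goA text base_offset (text.length + 2) 0

-- ===== PORT B =====
-- the token-append snippet of Source B ("if tok_start is not None: tokens.append(...)")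
def finishB (orig : List Char) (base : Int) (ts? : Option Nat) (te : Nat) : List (String × Int) :=
  match ts? with
  | some ts => [(String.ofList (PySem.Chars.slice orig (some (ts : Int)) (some (te : Int))), base + (ts : Int))]
  | none => []

-- Source B's for loop over the characters, state (i, tok_start, tok_end)
def goB (orig : List Char) (base : Int) : List Char → Nat → Option Nat → Nat → List (String × Int)
  | [], _, ts?, te => finishB orig base ts? te
  | c :: rest, i, ts?, te =>
    if c = '#' then finishB orig base ts? te
    else if c = ',' then finishB orig base ts? te ++ goB orig base rest (i+1) none te
    else if PySem.Chars.isspace c then goB orig base rest (i+1) ts? te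
    else goB orig base rest (i+1) (some (ts?.getD i)) (i+1)

def iter_code_tokens_py_alt (value_text : String) (base_offset : Int) : List (String × Int) :=
  goB value_text.toList base_offset value_text.toList 0 none 0

-- ===== PRECONDITION & SPEC =====
def Spec_iter_code_tokens_py (value_text : String) (base_offset : Int) (out : List (String × Int)) : Prop := out = iter_code_tokens_py_alt value_text base_offset
instance (value_text : String) (base_offset : Int) (out : List (String × Int)) : Decidable (Spec_iter_code_tokens_py value_text base_offset out) := by unfold Spec_iter_code_tokens_py; infer_instance

-- ===== CLAIM (what is proved, stated in full; the proofs are below) =====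
def Claim_equal_iter_code_tokens_py : Prop := ∀ (value_text : String) (base_offset : Int), Dom_iter_code_tokens_py value_text base_offset → Spec_iter_code_tokens_py value_text base_offset (iter_code_tokens_py value_text base_offset)

-- ===== LEMMAS AND PROOFS =====

-- what one segment contributes in A's loop
def emitSeg (base : Int) (s : List Char) (i : Nat) : List (String × Int) :=
  if PySem.Chars.strip s ≠ [] then
    [(String.ofList (PySem.Chars.strip s), base + ((i + (s.length - (PySem.Chars.lstrip s).length) : Nat) : Int))]
  else []

theorem mem_iff_singleton_infix {a : Char} {l : List Char} : a ∈ l ↔ [a] <:+: l := by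
  constructor
  · intro h
    obtain ⟨s, t, rfl⟩ := List.append_of_mem h
    exact ⟨s, t, by simp⟩
  · intro h; exact h.mem (by simp)

theorem lstrip_cons (c : Char) (s : List Char) :
    PySem.Chars.lstrip (c :: s) = if PySem.Chars.isspace c then PySem.Chars.lstrip s else c :: s := by
  by_cases h : PySem.Chars.isspace c <;> simp [PySem.Chars.lstrip, List.dropWhile, h]

theorem rstrip_cons (c : Char) (s : List Char) :
    PySem.Chars.rstrip (c :: s) =
      if PySem.Chars.rstrip s = [] then (if PySem.Chars.isspace c then [] else [c])
      else c :: PySem.Chars.rstrip s := by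
  have hrev : (c :: s).reverse = s.reverse ++ [c] := by simp
  by_cases h : List.dropWhile PySem.Chars.isspace s.reverse = []
  · have hnil : PySem.Chars.rstrip s = [] := by simp [PySem.Chars.rstrip, h]
    by_cases hc : PySem.Chars.isspace c <;>
      simp [PySem.Chars.rstrip, hrev, List.dropWhile_append, h, hnil, List.dropWhile, hc]
  · have hnnil : PySem.Chars.rstrip s ≠ [] := by simp [PySem.Chars.rstrip, h]
    simp [PySem.Chars.rstrip, hrev, List.dropWhile_append, h, hnnil]

theorem lstrip_eq_nil_iff {s : List Char} :
    PySem.Chars.lstrip s = [] ↔ ∀ c ∈ s, PySem.Chars.isspace c := by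
  simp [PySem.Chars.lstrip, List.dropWhile_eq_nil_iff]

theorem rstrip_eq_nil_iff {s : List Char} :
    PySem.Chars.rstrip s = [] ↔ ∀ c ∈ s, PySem.Chars.isspace c := by
  simp [PySem.Chars.rstrip, List.dropWhile_eq_nil_iff]

theorem length_lstrip_le (s : List Char) : (PySem.Chars.lstrip s).length ≤ s.length :=
  List.length_dropWhile_le _ _

theorem lstrip_suffix (s : List Char) : PySem.Chars.lstrip s <:+ s := List.dropWhile_suffix _

theorem rstrip_prefix (s : List Char) : PySem.Chars.rstrip s <+: s := by
  obtain ⟨p, hp⟩ := List.dropWhile_suffix (l := s.reverse) (p := PySem.Chars.isspace)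
  refine ⟨p.reverse, ?_⟩
  have : s = (p ++ List.dropWhile PySem.Chars.isspace s.reverse).reverse := by
    rw [hp, List.reverse_reverse]
  rw [PySem.Chars.rstrip]
  conv_rhs => rw [this]
  simp

theorem lstrip_head_not_space {s : List Char} (h : PySem.Chars.lstrip s ≠ []) :
    ¬ (∀ c ∈ PySem.Chars.lstrip s, PySem.Chars.isspace c) := by
  intro hall
  have hh := List.head_dropWhile_not PySem.Chars.isspace (l := s) h
  exact absurd (hall _ (List.head_mem h)) (by simp [PySem.Chars.lstrip] at hh ⊢; exact hh)

theorem strip_eq_nil_iff {s : List Char} :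
    PySem.Chars.strip s = [] ↔ PySem.Chars.lstrip s = [] := by
  constructor
  · intro h
    by_contra hne
    exact lstrip_head_not_space hne (rstrip_eq_nil_iff.mp h)
  · intro h
    unfold PySem.Chars.strip
    rw [h]
    decide

theorem rstrip_lstrip_ne_nil {s : List Char} (h : PySem.Chars.lstrip s ≠ []) :
    PySem.Chars.rstrip (PySem.Chars.lstrip s) ≠ [] := by
  intro hc
  exact lstrip_head_not_space h (rstrip_eq_nil_iff.mp hc)

theorem rstrip_append {p x : List Char} (hx : PySem.Chars.rstrip x ≠ []) :
    PySem.Chars.rstrip (p ++ x) = p ++ PySem.Chars.rstrip x := by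
  have hdw : List.dropWhile PySem.Chars.isspace x.reverse ≠ [] := by
    intro hc; exact hx (by simp [PySem.Chars.rstrip, hc])
  simp [PySem.Chars.rstrip, List.dropWhile_append, hdw]

-- B1: the break at '#'
theorem goB_hash (orig : List Char) (base : Int) (r : List Char) :
    ∀ t, '#' ∉ t → ∀ i ts? te,
      goB orig base (t ++ '#' :: r) i ts? te = goB orig base t i ts? te := by
  intro t
  induction t with
  | nil => intro _ i ts? te; simp [goB]
  | cons c t' ih =>
    intro hmem i ts? te
    have hc : c ≠ '#' := fun h => hmem (by simp [h])
    have ht' : '#' ∉ t' := fun h => hmem (by simp [h])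
    by_cases h1 : c = ',' <;> by_cases h2 : PySem.Chars.isspace c <;>
      simp [goB, hc, h1, h2, ih ht']

theorem goB_congr (orig : List Char) (base : Int) (l : List Char) (ts? : Option Nat)
    {i i' te te' : Nat} (h1 : i = i') (h2 : te = te') :
    goB orig base l i ts? te = goB orig base l i' ts? te' := by rw [h1, h2]

-- B3gen: scanning a comma/hash-free run with the token already open
theorem goB_run_open (orig : List Char) (base : Int) :
    ∀ s, ',' ∉ s → '#' ∉ s → ∀ r i ts te,
      goB orig base (s ++ r) i (some ts) te =
        goB orig base r (i + s.length) (some ts)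
          (if PySem.Chars.rstrip s = [] then te else i + (PySem.Chars.rstrip s).length) := by
  intro s
  induction s with
  | nil => intro _ _ r i ts te; simp [PySem.Chars.rstrip]
  | cons c s' ih =>
    intro hcm hh r i ts te
    have hc1 : c ≠ ',' := fun h => hcm (by simp [h])
    have hc2 : c ≠ '#' := fun h => hh (by simp [h])
    have hm1 : ',' ∉ s' := fun h => hcm (by simp [h])
    have hm2 : '#' ∉ s' := fun h => hh (by simp [h])
    rw [rstrip_cons]
    by_cases hws : PySem.Chars.isspace c
    · simp only [List.cons_append, goB, if_neg hc2, if_neg hc1, if_pos hws]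
      rw [ih hm1 hm2]
      by_cases hr : PySem.Chars.rstrip s' = []
      · simp only [hr, if_pos, if_true, if_pos hws]
        exact goB_congr _ _ _ _ (by (try simp); (try omega)) rfl
      · have hne : c :: PySem.Chars.rstrip s' ≠ [] := by simp
        simp only [hr, if_neg, if_false, hne, List.length_cons]
        exact goB_congr _ _ _ _ (by (try simp); (try omega)) (by (try simp); (try omega))
    · simp only [List.cons_append, goB, if_neg hc2, if_neg hc1, if_neg hws, Option.getD_some]
      rw [ih hm1 hm2]
      by_cases hr : PySem.Chars.rstrip s' = []
      · have hne : ¬ ([c] = []) := by simp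
        simp only [hr, if_pos, if_true, if_neg hws, hne, if_false, List.length_cons]
        exact goB_congr _ _ _ _ (by (try simp); (try omega)) (by (try simp); (try omega))
      · have hne : c :: PySem.Chars.rstrip s' ≠ [] := by simp
        simp only [hr, if_neg, if_false, hne, List.length_cons]
        exact goB_congr _ _ _ _ (by (try simp); (try omega)) (by (try simp); (try omega))

-- B2gen: scanning a comma/hash-free run from the reset state
theorem goB_run (orig : List Char) (base : Int) :
    ∀ s, ',' ∉ s → '#' ∉ s → ∀ r i te,
      goB orig base (s ++ r) i none te =
        goB orig base r (i + s.length)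
          (if PySem.Chars.lstrip s = [] then none
           else some (i + (s.length - (PySem.Chars.lstrip s).length)))
          (if PySem.Chars.rstrip s = [] then te else i + (PySem.Chars.rstrip s).length) := by
  intro s
  induction s with
  | nil => intro _ _ r i te; simp [PySem.Chars.lstrip, PySem.Chars.rstrip]
  | cons c s' ih =>
    intro hcm hh r i te
    have hc1 : c ≠ ',' := fun h => hcm (by simp [h])
    have hc2 : c ≠ '#' := fun h => hh (by simp [h])
    have hm1 : ',' ∉ s' := fun h => hcm (by simp [h])
    have hm2 : '#' ∉ s' := fun h => hh (by simp [h])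
    have hlen := length_lstrip_le s'
    rw [lstrip_cons, rstrip_cons]
    by_cases hws : PySem.Chars.isspace c
    · simp only [List.cons_append, goB, if_neg hc2, if_neg hc1, if_pos hws]
      rw [ih hm1 hm2]
      by_cases hl : PySem.Chars.lstrip s' = []
      · have hr : PySem.Chars.rstrip s' = [] :=
          rstrip_eq_nil_iff.mpr (lstrip_eq_nil_iff.mp hl)
        simp only [hl, hr, if_pos, if_true, if_pos hws]
        exact goB_congr _ _ _ _ (by (try simp); (try omega)) rfl
      · have hr : PySem.Chars.rstrip s' ≠ [] := by
          intro hc; exact hl (lstrip_eq_nil_iff.mpr (rstrip_eq_nil_iff.mp hc))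
        have hne : c :: PySem.Chars.rstrip s' ≠ [] := by simp
        simp only [hl, hr, hne, if_neg, if_false, if_pos hws, List.length_cons]
        have hts : some (i + 1 + (s'.length - (PySem.Chars.lstrip s').length))
            = some (i + (s'.length + 1 - (PySem.Chars.lstrip s').length)) := by
          congr 1; omega
        rw [hts]
        exact goB_congr _ _ _ _ (by (try simp); (try omega)) (by (try simp); (try omega))
    · simp only [List.cons_append, goB, if_neg hc2, if_neg hc1, if_neg hws, Option.getD_none]
      rw [goB_run_open orig base s' hm1 hm2]
      have hlne : c :: s' ≠ [] := by simp
      simp only [if_neg hws, hlne, if_neg, if_false, List.length_cons]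
      rw [show i + (s'.length + 1 - (s'.length + 1)) = i by omega]
      by_cases hr : PySem.Chars.rstrip s' = []
      · have hne : ¬ ([c] = []) := by simp
        simp only [hr, if_pos, if_true, hne, if_false, List.length_cons]
        exact goB_congr _ _ _ _ (by (try simp); (try omega)) (by (try simp); (try omega))
      · have hne : c :: PySem.Chars.rstrip s' ≠ [] := by simp
        simp only [hr, if_neg, if_false, hne, List.length_cons]
        exact goB_congr _ _ _ _ (by (try simp); (try omega)) (by (try simp); (try omega))

-- the emitted slice is exactly strip of the segment
theorem slice_emit (orig s : List Char) (i : Nat)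
    (hwin : (orig.drop i).take s.length = s) (hne : PySem.Chars.lstrip s ≠ []) :
    PySem.Chars.slice orig (some ((i + (s.length - (PySem.Chars.lstrip s).length) : Nat) : Int))
      (some ((i + (PySem.Chars.rstrip s).length : Nat) : Int)) = PySem.Chars.strip s := by
  obtain ⟨p, hp⟩ := lstrip_suffix s
  have hplen : p.length + (PySem.Chars.lstrip s).length = s.length := by
    have := congrArg List.length hp; simpa using this
  have hr := rstrip_lstrip_ne_nil hne
  have hra : PySem.Chars.rstrip s = p ++ PySem.Chars.strip s := by
    conv_lhs => rw [← hp]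
    rw [rstrip_append hr]
    rfl
  have hstriplen : (PySem.Chars.rstrip s).length = p.length + (PySem.Chars.strip s).length := by
    rw [hra]; simp
  have hlead : s.length - (PySem.Chars.lstrip s).length = p.length := by omega
  have hsp : PySem.Chars.strip s <+: PySem.Chars.lstrip s := rstrip_prefix _
  have hsplen : (PySem.Chars.strip s).length ≤ (PySem.Chars.lstrip s).length := hsp.length_le
  rw [PySem.Chars.slice_eq_listSlice, PySem.List.slice_natCast, hlead]
  have h1 : orig.drop (i + p.length) = (orig.drop i).drop p.length := by
    rw [List.drop_drop]
  rw [h1]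
  have hsd : s.drop p.length = PySem.Chars.lstrip s := by
    conv_lhs => rw [← hp]
    rw [List.drop_append_of_le_length (le_refl _)]
    simp
  have hO : orig.drop i = s ++ (orig.drop i).drop s.length := by
    conv_lhs => rw [← List.take_append_drop s.length (orig.drop i)]
    rw [hwin]
  rw [hO]
  have h2 : (s ++ (orig.drop i).drop s.length).drop p.length
      = PySem.Chars.lstrip s ++ (orig.drop i).drop s.length := by
    rw [List.drop_append_of_le_length (by omega), hsd]
  rw [h2]
  have harg : i + (PySem.Chars.rstrip s).length - (i + p.length) = (PySem.Chars.strip s).length := by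
    omega
  rw [harg]
  rw [List.take_append_of_le_length hsplen]
  exact (List.prefix_iff_eq_take.mp hsp).symm

theorem finish_emit (orig : List Char) (base : Int) (s : List Char) (i te : Nat)
    (hwin : (orig.drop i).take s.length = s) :
    finishB orig base
      (if PySem.Chars.lstrip s = [] then none
       else some (i + (s.length - (PySem.Chars.lstrip s).length)))
      (if PySem.Chars.rstrip s = [] then te else i + (PySem.Chars.rstrip s).length)
      = emitSeg base s i := by
  by_cases hl : PySem.Chars.lstrip s = []
  · have hst : PySem.Chars.strip s = [] := strip_eq_nil_iff.mpr hl
    simp [hl, finishB, emitSeg, hst]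
  · have hr : PySem.Chars.rstrip s ≠ [] := by
      intro hc; exact hl (lstrip_eq_nil_iff.mpr (rstrip_eq_nil_iff.mp hc))
    have hst : PySem.Chars.strip s ≠ [] := fun hc => hl (strip_eq_nil_iff.mp hc)
    rw [if_neg hl, if_neg hr]
    simp only [finishB]
    rw [slice_emit orig s i hwin hl]
    simp [emitSeg, hst]

theorem prefix_window {text orig : List Char} (h : text <+: orig) {i k : Nat}
    (hk : i + k ≤ text.length) : (orig.drop i).take k = (text.drop i).take k := by
  obtain ⟨t, rfl⟩ := h
  rw [List.drop_append_of_le_length (by omega),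
      List.take_append_of_le_length (by (try simp); (try omega))]

-- main loop correspondence
theorem main_loop (text orig : List Char) (base : Int) (hh : '#' ∉ text) (hp : text <+: orig) :
    ∀ fuel start te, start ≤ text.length → text.length + 2 ≤ fuel + start →
      goA text base fuel start = goB orig base (text.drop start) start none te := by
  intro fuel
  induction fuel with
  | zero => intro start te h1 h2; omega
  | succ fuel ih =>
    intro start te h1 h2
    have hhd : '#' ∉ text.drop start := fun h => hh ((List.drop_subset _ _) h)
    have hwin : (orig.drop start).take (text.drop start).length = text.drop start := by
      rw [prefix_window hp (by simp; omega)]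
      simp
    rw [goA, if_pos h1,
        PySem.Chars.findFrom_natCast text [','] start h1]
    by_cases hf : PySem.Chars.find (text.drop start) [','] = -1
    · -- no comma left
      have hcm : ',' ∉ text.drop start := by
        intro hm
        exact ((PySem.Chars.find_eq_neg_one_iff _ _).mp hf) (mem_iff_singleton_infix.mp hm)
      simp only [hf, if_pos, if_true]
      have hseg : PySem.Chars.slice text (some (start : Int)) none = text.drop start := by
        rw [PySem.Chars.slice_eq_listSlice, PySem.List.slice_from_natCast]
      rw [hseg]
      conv_rhs => rw [show text.drop start = text.drop start ++ [] by simp]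
      rw [goB_run orig base _ hcm hhd [] start te,
          show goB orig base [] (start + (text.drop start).length) = finishB orig base from rfl,
          finish_emit orig base _ start te hwin]
      simp [emitSeg]
    · -- comma at toNat f
      have hge : 0 ≤ PySem.Chars.find (text.drop start) [','] := by
        have := PySem.Chars.neg_one_le_find (s := text.drop start) (sub := [','])
        omega
      set f := PySem.Chars.find (text.drop start) [','] with hfdef
      obtain ⟨hpre, hmin⟩ := PySem.Chars.find_spec (s := text.drop start) (sub := [',']) hge
      set j := f.toNat with hjdef
      have hdj : (text.drop start).drop j ≠ [] := by
        intro hnil; rw [hnil] at hpre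
        simp at hpre
      have hjlt : j < (text.drop start).length := by
        by_contra hcon
        exact hdj (List.drop_eq_nil_of_le (by omega))
      have hjlen : j < text.length - start := by simpa using hjlt
      have hu : (text.drop start).drop j = ',' :: (text.drop start).drop (j+1) := by
        obtain ⟨u, hu'⟩ := hpre
        cases hdrop : (text.drop start).drop j with
        | nil => exact absurd hdrop hdj
        | cons a u' =>
          rw [hdrop] at hu'
          have ha : a = ',' := by
            have := congrArg (List.head?) hu'.symm
            simpa using this
          subst ha
          congr 1
          rw [← List.drop_drop, hdrop]
          simp
      have hfj : f = (j : Int) := by omega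
      have hci : (start : Int) + f = ((start + j : Nat) : Int) := by push_cast; omega
      have hcine : ¬ (((start + j : Nat) : Int) = -1) := by omega
      simp only [hf, if_false, hci, hcine, Int.toNat_natCast]
      have hseg : PySem.Chars.slice text (some (start : Int)) (some ((start + j : Nat) : Int)) =
          (text.drop start).take j := by
        rw [PySem.Chars.slice_eq_listSlice, PySem.List.slice_natCast]
        congr 1; omega
      rw [hseg]
      set seg := (text.drop start).take j with hsegdef
      have hsegcm : ',' ∉ seg := by
        intro hm
        obtain ⟨i', hi', hgi⟩ := List.getElem_of_mem hm
        have hi'' : i' < j := by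
          have := hi'; simp [hsegdef] at this; omega
        have hgi' : (text.drop start)[i']'(by omega) = ',' := by
          rw [← hgi]
          exact List.getElem_take.symm
        have hdropeq : (text.drop start).drop i' = ',' :: (text.drop start).drop (i'+1) := by
          rw [List.drop_eq_getElem_cons (l := text.drop start) (by omega)]
          rw [hgi']
        exact hmin i' (by omega) ⟨(text.drop start).drop (i'+1), by rw [hdropeq]; rfl⟩
      have hseghh : '#' ∉ seg := fun h => hhd ((List.take_subset _ _) h)
      have hseglen : seg.length = j := by simp [hsegdef]; omega
      have hsegwin : (orig.drop start).take seg.length = seg := by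
        rw [hseglen, prefix_window hp (by omega)]
      have hdecomp : text.drop start = seg ++ ',' :: (text.drop start).drop (j+1) := by
        rw [← hu, hsegdef, List.take_append_drop]
      conv_rhs => rw [hdecomp]
      rw [goB_run orig base seg hsegcm hseghh _ start te]
      have hcomma : goB orig base (',' :: (text.drop start).drop (j+1)) (start + seg.length)
          (if PySem.Chars.lstrip seg = [] then none
           else some (start + (seg.length - (PySem.Chars.lstrip seg).length)))
          (if PySem.Chars.rstrip seg = [] then te else start + (PySem.Chars.rstrip seg).length)
          = emitSeg base seg start ++ goB orig base ((text.drop start).drop (j+1)) (start + seg.length + 1) none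
              (if PySem.Chars.rstrip seg = [] then te else start + (PySem.Chars.rstrip seg).length) := by
        rw [goB]
        rw [if_neg (by decide), if_pos rfl]
        rw [finish_emit orig base seg start te hsegwin]
      rw [hcomma]
      have hdd : (text.drop start).drop (j+1) = text.drop (start + (j+1)) := by
        rw [List.drop_drop]
      rw [hdd]
      have hih := ih (start + (j+1))
        (if PySem.Chars.rstrip seg = [] then te else start + (PySem.Chars.rstrip seg).length)
        (by omega) (by omega)
      rw [show start + seg.length + 1 = start + (j + 1) from by rw [hseglen]; omega, ← hih]
      simp [emitSeg, Nat.add_assoc]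

-- ===== VERDICT (by name: the statement is the Claim_ definition above) =====
theorem iter_code_tokens_py_spec : Claim_equal_iter_code_tokens_py := by
  intro value_text base_offset _
  unfold Spec_iter_code_tokens_py iter_code_tokens_py iter_code_tokens_py_alt stripCommentA
  set cs := value_text.toList with hcs
  by_cases hneg : PySem.Chars.find cs ['#'] < 0
  · have hf : PySem.Chars.find cs ['#'] = -1 := by
      have := PySem.Chars.neg_one_le_find (s := cs) (sub := ['#'])
      omega
    have hh : '#' ∉ cs := by
      intro hm
      exact ((PySem.Chars.find_eq_neg_one_iff _ _).mp hf) (mem_iff_singleton_infix.mp hm)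
    simp only [if_pos hneg]
    rw [main_loop cs cs base_offset hh (List.prefix_refl cs) (cs.length + 2) 0 0
        (by omega) (by omega)]
    simp
  · have hge : 0 ≤ PySem.Chars.find cs ['#'] := by omega
    obtain ⟨hpre, hmin⟩ := PySem.Chars.find_spec (s := cs) (sub := ['#']) hge
    set m := (PySem.Chars.find cs ['#']).toNat with hm
    have htext : PySem.Chars.slice cs none (some (PySem.Chars.find cs ['#'])) = cs.take m := by
      rw [PySem.Chars.slice_eq_listSlice, PySem.List.slice_to cs hge]
    have hdm : cs.drop m ≠ [] := by
      intro hnil; rw [hnil] at hpre; simp at hpre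
    have hmlt : m < cs.length := by
      by_contra hcon
      exact hdm (List.drop_eq_nil_of_le (by omega))
    have hdecomp : cs = cs.take m ++ '#' :: cs.drop (m + 1) := by
      obtain ⟨u, hu'⟩ := hpre
      cases hdrop : cs.drop m with
      | nil => exact absurd hdrop hdm
      | cons a u' =>
        rw [hdrop] at hu'
        have ha : a = '#' := by
          have := congrArg (List.head?) hu'.symm
          simpa using this
        subst ha
        conv_lhs => rw [← List.take_append_drop m cs]
        rw [hdrop]
        congr 1
        rw [← List.drop_drop, hdrop]
        simp
    have hh : '#' ∉ cs.take m := by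
      intro hmem
      obtain ⟨i', hi', hgi⟩ := List.getElem_of_mem hmem
      have hi'' : i' < m := by simp at hi'; omega
      have hgi' : cs[i']'(by omega) = '#' := by
        rw [← hgi]
        exact List.getElem_take.symm
      have hdropeq : cs.drop i' = '#' :: cs.drop (i'+1) := by
        rw [List.drop_eq_getElem_cons (l := cs) (by omega)]
        rw [hgi']
      exact hmin i' (by omega) ⟨cs.drop (i'+1), by rw [hdropeq]; rfl⟩
    simp only [if_neg hneg]
    rw [htext]
    rw [main_loop (cs.take m) cs base_offset hh (List.take_prefix m cs)
        ((cs.take m).length + 2) 0 0 (by omega) (by omega)]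
    have hB : goB cs base_offset cs 0 none 0 = goB cs base_offset (cs.take m) 0 none 0 := by
      conv_lhs => rw [hdecomp]
      rw [goB_hash _ base_offset (cs.drop (m+1)) (cs.take m) hh 0 none 0]
      rw [← hdecomp]
    rw [hB]
    simp
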